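-- pv_equiv track=rewrite | github.com/Jfelipeper/Tp1_Alumnos_Udesa | TpOvejero/tp1_funciones_Ovejero.py | cantidad_rachas
-- ===== SOURCE A (Python) =====
-- def cantidad_rachas(total_estado:list)-> int:
--     '''
--     Cuenta la cantidad de rachas de 4 o más días en que se repite un estado,
--     según una lista con los mismos
--
--     Args:
--     -total_estados: Lista que contiene estados como elementos de la misma
--
--     Returns:
--     -conteo_rachas: entero que describe la cantidad de rachas de 4 o más días
--     '''
--     racha_actual = 1
--     conteo_rachas = 0
--     for i,estado in enumerate(total_estado[:-1]): #desenpaqueto para indexar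
--         if estado == total_estado[i+1]:
--             racha_actual += 1
--         else:
--             if racha_actual > 3: #ante de reiniciar el contador de rachas verifico si es mayor a 3
--                 conteo_rachas += 1
--             racha_actual = 1
--     if racha_actual > 3:
--         conteo_rachas += 1
--         #utilizo esta condicion en caso de que mi lista termine en racha, ya que no existirá
--         #iteración "i+1"
--     return conteo_rachas
-- ===== SOURCE B (Python) =====
-- def cantidad_rachas(total_estado: list) -> int:
--     '''Cuenta rachas de 4+ dias consecutivos con el mismo estado, consumiendo
--     la lista racha por racha (sin contador corrido ni descarga final).'''
--     conteo_rachas = 0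
--     resto = total_estado
--     while resto:
--         primero, cola = resto[0], resto[1:]
--         t = 0
--         while t < len(cola) and cola[t] == primero:
--             t += 1
--         if t + 1 >= 4:
--             conteo_rachas += 1
--         resto = cola[t:]
--     return conteo_rachas
-- ===== Notes on version B (the rewrite author's own statement) =====
-- stated objective: alternative
-- what changed: B consumes the list run by run (peel each maximal run of equal states with an inner scan and count it if its length is >= 4), eliminating A's running counter with i+1 lookahead and the post-loop flush.
import Mathlib
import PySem

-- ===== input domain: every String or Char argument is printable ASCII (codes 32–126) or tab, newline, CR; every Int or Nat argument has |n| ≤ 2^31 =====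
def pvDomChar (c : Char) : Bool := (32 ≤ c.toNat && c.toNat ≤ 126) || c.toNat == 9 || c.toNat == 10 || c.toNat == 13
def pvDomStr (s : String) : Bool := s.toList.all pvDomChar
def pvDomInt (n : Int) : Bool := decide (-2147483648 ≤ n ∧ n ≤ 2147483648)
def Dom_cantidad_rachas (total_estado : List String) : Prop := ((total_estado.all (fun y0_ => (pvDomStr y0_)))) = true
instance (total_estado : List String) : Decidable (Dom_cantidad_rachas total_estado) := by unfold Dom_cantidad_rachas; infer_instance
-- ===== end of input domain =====

-- B counts runs by peeling one maximal run at a time instead of A's running counter with i+1 lookahead and post-loop flush; same O(n) cost (objective: alternative).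

-- ===== PORT A =====
-- the for-loop over enumerate(total_estado[:-1]) with running (racha_actual, conteo_rachas) state, then the
-- post-loop flush; the index i+1 is always in range for the loop's elements, so the total pyGetD is exact here
def cantidad_rachas (total_estado : List String) : Int :=
  let st := (PySem.List.enumerate (PySem.List.slice total_estado none (some (-1)))).foldl
    (fun (s : Int × Int) (p : Int × String) =>
      if p.2 == PySem.List.pyGetD total_estado (p.1 + 1) "" then (s.1 + 1, s.2)
      else (1, if s.1 > 3 then s.2 + 1 else s.2))
    (1, 0)
  if st.1 > 3 then st.2 + 1 else st.2

-- ===== PORT B =====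
-- Source B's outer while, one step per maximal run; the inner counting while ('t += 1 while cola[t] == primero')
-- is the length of cola.takeWhile (· == primero), and 'resto = cola[t:]' is cola.drop t
def cantidad_rachas_alt_go (resto : List String) (conteo_rachas : Int) : Int :=
  match resto with
  | [] => conteo_rachas
  | primero :: cola =>
    let t := (cola.takeWhile (fun s => s == primero)).length
    cantidad_rachas_alt_go (cola.drop t)
      (if 4 ≤ (t : Int) + 1 then conteo_rachas + 1 else conteo_rachas)
termination_by resto.length
decreasing_by simp

def cantidad_rachas_alt (total_estado : List String) : Int :=
  cantidad_rachas_alt_go total_estado 0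

-- ===== PRECONDITION & SPEC =====
def Spec_cantidad_rachas (total_estado : List String) (out : Int) : Prop := out = cantidad_rachas_alt total_estado
instance (total_estado : List String) (out : Int) : Decidable (Spec_cantidad_rachas total_estado out) := by unfold Spec_cantidad_rachas; infer_instance

-- ===== CLAIM (what is proved, stated in full; the proofs are below) =====
def Claim_equal_cantidad_rachas : Prop := ∀ (total_estado : List String), Dom_cantidad_rachas total_estado → Spec_cantidad_rachas total_estado (cantidad_rachas total_estado)

-- ===== LEMMAS AND PROOFS =====

lemma enum_len {α : Type} (xs : List α) (i : Int) : (PySem.List.enumerate xs i).length = xs.length := by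
  induction xs generalizing i with
  | nil => simp [PySem.List.enumerate]
  | cons x t ih => simp [PySem.List.enumerate, ih]

lemma enum_get {α : Type} (xs : List α) (i : Int) (k : Nat) (hk : k < xs.length) :
    (PySem.List.enumerate xs i)[k]'(by rw [enum_len]; exact hk) = (i + k, xs[k]) := by
  induction xs generalizing i k with
  | nil => simp at hk
  | cons x t ih =>
    cases k with
    | zero => simp [PySem.List.enumerate]
    | succ m =>
      simp only [PySem.List.enumerate, List.getElem_cons_succ]
      rw [ih (i+1) m (by simpa using hk)]
      have : i + 1 + (m : Int) = i + ((m : Nat) + 1 : Nat) := by push_cast; ring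
      rw [this]

-- A's loop data: pairing each element of total_estado[:-1] with its successor IS zipping xs with its tail
lemma enum_map_zip (xs : List String) :
    ((PySem.List.enumerate (PySem.List.slice xs none (some (-1)))).map
      (fun p : Int × String => (p.2, PySem.List.pyGetD xs (p.1 + 1) ""))) = xs.zip xs.tail := by
  rw [PySem.List.slice_to_neg_one]
  apply List.ext_getElem
  · simp [enum_len]
  · intro k h1 h2
    have hk : k < xs.length - 1 := by simpa [enum_len] using h1
    have hk1 : k + 1 < xs.length := by omega
    rw [List.getElem_map]
    rw [enum_get _ 0 k (by simpa using hk)]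
    have h0 : ((0:Int) + k + 1) = ((k+1 : Nat) : Int) := by push_cast; ring
    rw [h0, PySem.List.pyGetD_natCast]
    simp [List.getElem_zip, List.getElem_tail, List.getElem_dropLast,
      List.getD_eq_getElem?_getD, List.getElem?_eq_getElem hk1]

-- A's loop, restated as structural recursion over adjacent pairs
def gA (x : String) (ys : List String) (r c : Int) : Int :=
  match ys with
  | [] => if r > 3 then c + 1 else c
  | y :: ys' => if x == y then gA y ys' (r + 1) c else gA y ys' 1 (if r > 3 then c + 1 else c)

lemma foldA_eq (xs : List String) (r c : Int) :
    (PySem.List.enumerate (PySem.List.slice xs none (some (-1)))).foldl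
      (fun (s : Int × Int) (p : Int × String) =>
        if p.2 == PySem.List.pyGetD xs (p.1 + 1) "" then (s.1 + 1, s.2)
        else (1, if s.1 > 3 then s.2 + 1 else s.2)) (r, c)
    = (xs.zip xs.tail).foldl
      (fun (s : Int × Int) (q : String × String) =>
        if q.1 == q.2 then (s.1 + 1, s.2) else (1, if s.1 > 3 then s.2 + 1 else s.2)) (r, c) := by
  rw [← enum_map_zip xs, List.foldl_map]

lemma foldl_zip_gA (x : String) (ys : List String) (r c : Int) :
    (let st := ((x :: ys).zip ys).foldl
      (fun (s : Int × Int) (q : String × String) =>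
        if q.1 == q.2 then (s.1 + 1, s.2) else (1, if s.1 > 3 then s.2 + 1 else s.2)) (r, c)
     if st.1 > 3 then st.2 + 1 else st.2) = gA x ys r c := by
  induction ys generalizing x r c with
  | nil => simp [gA]
  | cons y ys' ih =>
    simp only [List.zip_cons_cons, List.foldl_cons, gA]
    by_cases h : x == y
    · simp only [h, if_pos rfl]
      exact ih y (r+1) c
    · simp only [h]
      simp only [Bool.false_eq_true, if_false]
      exact ih y 1 _

-- the A-recursion with current run length r ending at x equals B's run-peeling on the rest
lemma gA_eq_go (ys : List String) (x : String) (r c : Int) :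
    gA x ys r c =
      cantidad_rachas_alt_go (ys.drop (ys.takeWhile (fun s => s == x)).length)
        (if r + (ys.takeWhile (fun s => s == x)).length > 3 then c + 1 else c) := by
  induction ys generalizing x r c with
  | nil => simp [gA, cantidad_rachas_alt_go]
  | cons y ys' ih =>
    by_cases h : x = y
    · subst h
      simp only [gA, beq_self_eq_true, if_pos rfl]
      rw [ih x (r+1) c]
      simp only [List.takeWhile_cons, beq_self_eq_true, if_true, List.length_cons,
        List.drop_succ_cons]
      congr 1
      split_ifs with h1 h2 <;> first | rfl | (exfalso; push_cast at *; omega)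
    · have hb : (x == y) = false := by simp [h]
      have hb2 : (y == x) = false := by simp [Ne.symm h]
      simp only [gA, hb, Bool.false_eq_true, if_false, List.takeWhile_cons, hb2,
        List.length_nil, List.drop_zero]
      rw [ih y 1 _]
      rw [cantidad_rachas_alt_go]
      congr 1
      split_ifs with h1 h2 <;> first | rfl | (exfalso; push_cast at *; omega)

lemma main_eq (xs : List String) : cantidad_rachas xs = cantidad_rachas_alt_go xs 0 := by
  cases xs with
  | nil => rw [cantidad_rachas_alt_go]; simp [cantidad_rachas, PySem.List.slice_to_neg_one, PySem.List.enumerate]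
  | cons x ys =>
    show (if ((PySem.List.enumerate (PySem.List.slice (x::ys) none (some (-1)))).foldl _ (1,0)).1 > 3
          then _ + 1 else _) = _
    rw [foldA_eq]
    simp only [List.tail_cons]
    rw [foldl_zip_gA x ys 1 0, gA_eq_go, cantidad_rachas_alt_go]
    congr 1
    split_ifs <;> first | rfl | (exfalso; push_cast at *; omega)

-- ===== VERDICT (by name: the statement is the Claim_ definition above) =====
theorem cantidad_rachas_spec : Claim_equal_cantidad_rachas := by
  intro xs _
  unfold Spec_cantidad_rachas cantidad_rachas_alt
  exact main_eq xs
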